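-- pv_equiv track=rewrite | github.com/xia2/xia2 | Experts/FindImages.py | ensure_no_batches_numbered_zero
-- ===== SOURCE A (Python) =====
-- import math
-- import string
--
-- def ensure_no_batches_numbered_zero(template, images, offset):
--     """Working in collaboration with digest_template, ensure that none of
--     the images end up being numbered 0, and if they do try to add last digit of
--     template section. Finally, if this extra character is not a digit raise
--     an exception."""
--
--     if min(images) > 0:
--         return template, images, offset
--
--     prefix = template.split("#")[0]
--     suffix = template.split("#")[-1]
--     hashes = template.count("#")
--
--     while min(images) == 0:
--         if not prefix[-1] in string.digits:
--             raise RuntimeError("image 0 found matching %s" % template)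
--
--         add = int(prefix[-1]) * int(math.pow(10, hashes))
--         offset -= add
--         hashes += 1
--         prefix = prefix[:-1]
--         images = [add + i for i in images]
--
--     template = "%s%s%s" % (prefix, "#" * hashes, suffix)
--
--     return template, images, offset
-- ===== SOURCE B (Python) =====
-- def ensure_no_batches_numbered_zero(template, images, offset):
--     """Closed-form rewrite: strip the trailing zeros of the prefix with
--     rstrip and compute the single effective shift arithmetically, instead
--     of rebuilding the image list and recomputing min() each iteration."""
--     if min(images) > 0:
--         return template, images, offset
--
--     parts = template.split("#")
--     prefix, suffix = parts[0], parts[-1]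
--     hashes = template.count("#")
--     total = 0
--
--     if min(images) == 0:
--         core = prefix.rstrip("0")
--         if not core or core[-1] not in "123456789":
--             raise RuntimeError("image 0 found matching %s" % template)
--         zeros = len(prefix) - len(core)
--         total = int(core[-1]) * 10 ** (hashes + zeros)
--         hashes += zeros + 1
--         prefix = core[:-1]
--
--     offset -= total
--     images = [total + i for i in images]
--     template = prefix + "#" * hashes + suffix
--     return template, images, offset
-- ===== Notes on version B (the rewrite author's own statement) =====
-- stated objective: simpler
-- what changed: B replaces A's while loop (which re-derives the shift digit by digit, rebuilding the whole image list and recomputing min() on every iteration) by one rstrip('0') on the prefix plus a closed-form computation of the single effective shift, applied to the images in one pass.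
import Mathlib
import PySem

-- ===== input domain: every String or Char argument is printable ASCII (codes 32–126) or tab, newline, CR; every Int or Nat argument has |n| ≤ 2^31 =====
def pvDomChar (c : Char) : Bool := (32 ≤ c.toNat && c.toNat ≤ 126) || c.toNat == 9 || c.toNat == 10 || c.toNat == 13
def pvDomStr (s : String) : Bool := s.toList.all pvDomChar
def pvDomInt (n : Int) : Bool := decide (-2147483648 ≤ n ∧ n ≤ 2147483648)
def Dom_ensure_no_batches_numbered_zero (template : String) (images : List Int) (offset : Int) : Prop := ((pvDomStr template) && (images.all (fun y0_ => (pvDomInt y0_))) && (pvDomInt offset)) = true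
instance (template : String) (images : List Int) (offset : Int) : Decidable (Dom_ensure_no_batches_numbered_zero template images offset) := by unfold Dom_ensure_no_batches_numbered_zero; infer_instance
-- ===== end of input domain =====

-- B separates the digit scan from the data: it strips the trailing zeros of the
-- pref with rstrip("0") and computes the one effective shift in closed form,
-- instead of A's while loop that rebuilds the image list and recomputes min()
-- every iteration (objective: simpler; return values only — no mutation either side).

-- ===== PORT A =====
-- string.digits
def pyStringDigits : List Char := ['0','1','2','3','4','5','6','7','8','9']

-- the 'while min(images) == 0' loop of A, state (pref, hashes, offset, images);
-- on Python's raise paths (IndexError on empty pref, RuntimeError on a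
-- non-digit) it returns the state unchanged — those inputs are outside Pre_.
-- int(math.pow(10, hashes)) is ported as 10 ^ hashes, exact for hashes ≤ 22
-- (Pre_ guarantees this bound; math.pow is a float).
def pyLoopA : List Char → Nat → Int → List Int → (List Char × Nat × Int × List Int)
  | p, hashes, offset, images =>
    if PySem.List.min? images (fun x => x) = some 0 then
      match hp : p.getLast? with
      | none => (p, hashes, offset, images)          -- Python: IndexError
      | some c =>
        if c ∈ pyStringDigits then
          let add : Int := ((c.toNat - 48 : Nat) : Int) * (10 : Int) ^ hashes
          pyLoopA p.dropLast (hashes + 1) (offset - add) (images.map (fun i => add + i))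
        else (p, hashes, offset, images)             -- Python: RuntimeError
    else (p, hashes, offset, images)
  termination_by p _ _ _ => p.length
  decreasing_by
    cases p with
    | nil => simp at hp
    | cons a t => simp [List.length_dropLast]

def ensure_no_batches_numbered_zero (template : String) (images : List Int) (offset : Int) : String × List Int × Int :=
  match PySem.List.min? images (fun x => x) with
  | none => (template, images, offset)               -- Python: ValueError on min([])
  | some m =>
    if m > 0 then (template, images, offset)
    else
      let parts := (PySem.Str.split? template "#").getD [template]
      let pref := ((PySem.List.pyGet? parts 0).getD "").toList
      let suffix := (PySem.List.pyGet? parts (-1)).getD ""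
      let hashes := PySem.Str.count template "#"
      let r := pyLoopA pref hashes offset images
      (String.mk r.1 ++ String.mk (List.replicate r.2.1 '#') ++ suffix, r.2.2.2, r.2.2.1)

-- ===== PORT B =====
def pyNonzeroDigits : List Char := ['1','2','3','4','5','6','7','8','9']

-- pref.rstrip("0"), ported by hand on List Char (exact: drops trailing '0' characters)
def pyRstripZeros (cs : List Char) : List Char := (cs.reverse.dropWhile (· == '0')).reverse

def ensure_no_batches_numbered_zero_alt (template : String) (images : List Int) (offset : Int) : String × List Int × Int :=
  match PySem.List.min? images (fun x => x) with
  | none => (template, images, offset)               -- Python: ValueError on min([])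
  | some m =>
    if m > 0 then (template, images, offset)
    else
      let parts := (PySem.Str.split? template "#").getD [template]
      let pref := ((PySem.List.pyGet? parts 0).getD "").toList
      let suffix := (PySem.List.pyGet? parts (-1)).getD ""
      let hashes := PySem.Str.count template "#"
      let st : Option (List Char × Nat × Int) :=
        if m = 0 then
          let core := pyRstripZeros pref
          match core.getLast? with
          | none => none                             -- Python: RuntimeError
          | some c =>
            if c ∈ pyNonzeroDigits then
              let zeros := pref.length - core.length
              some (core.dropLast, hashes + zeros + 1,
                    ((c.toNat - 48 : Nat) : Int) * (10 : Int) ^ (hashes + zeros))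
            else none                                -- Python: RuntimeError
        else some (pref, hashes, 0)
      match st with
      | none => (template, images, offset)           -- excluded by Pre_
      | some (p, h, total) =>
        (String.mk p ++ String.mk (List.replicate h '#') ++ suffix,
         images.map (fun i => total + i), offset - total)

-- ===== PRECONDITION & SPEC =====
-- Pre_ excludes exactly: (a) empty image lists (min([]) raises ValueError);
-- (b) min(images) == 0 with a pref whose trailing run of zeros is not followed
-- by a nonzero digit (A raises RuntimeError or IndexError there, B RuntimeError);
-- (c) min(images) == 0 needing 10^h with h ≥ 23, where A RETURNS a value built
-- from the inexact float int(math.pow(10, h)) that no exact port can match.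
def Pre_ensure_no_batches_numbered_zero (template : String) (images : List Int) (offset : Int) : Prop :=
  images ≠ [] ∧
  (PySem.List.min? images (fun x => x) = some 0 →
    let pref := ((PySem.List.pyGet? ((PySem.Str.split? template "#").getD [template]) 0).getD "").toList
    let core := (pref.reverse.dropWhile (· == '0')).reverse
    core.getLastD ' ' ∈ ['1','2','3','4','5','6','7','8','9'] ∧
    PySem.Str.count template "#" + (pref.length - core.length) ≤ 22)
instance (template : String) (images : List Int) (offset : Int) : Decidable (Pre_ensure_no_batches_numbered_zero template images offset) := by unfold Pre_ensure_no_batches_numbered_zero; infer_instance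

def pvWitness_ensure_no_batches_numbered_zero : String × List Int × Int := ("img_01###.cbf", [0, 1, 2], 5)

def Spec_ensure_no_batches_numbered_zero (template : String) (images : List Int) (offset : Int) (out : String × List Int × Int) : Prop := out = ensure_no_batches_numbered_zero_alt template images offset
instance (template : String) (images : List Int) (offset : Int) (out : String × List Int × Int) : Decidable (Spec_ensure_no_batches_numbered_zero template images offset out) := by unfold Spec_ensure_no_batches_numbered_zero; infer_instance

-- ===== CLAIM (what is proved, stated in full; the proofs are below) =====
def Claim_equal_ensure_no_batches_numbered_zero : Prop := ∀ (template : String) (images : List Int) (offset : Int), Dom_ensure_no_batches_numbered_zero template images offset → Pre_ensure_no_batches_numbered_zero template images offset → Spec_ensure_no_batches_numbered_zero template images offset (ensure_no_batches_numbered_zero template images offset)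

-- ===== LEMMAS AND PROOFS =====

theorem pv_foldl_min_add (c : Int) (t : List Int) : ∀ x : Int,
    (t.map (fun i => c + i)).foldl min (c + x) = c + t.foldl min x := by
  induction t with
  | nil => intro x; rfl
  | cons a t ih =>
    intro x
    simp only [List.map_cons, List.foldl_cons]
    rw [min_add_add_left, ih]

-- min over a list shifted by a constant
theorem pv_min?_map_add (c : Int) (xs : List Int) :
    PySem.List.min? (xs.map (fun i => c + i)) (fun x => x)
      = (PySem.List.min? xs (fun x => x)).map (fun m => c + m) := by
  cases xs with
  | nil => rfl
  | cons x t =>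
    simp only [List.map_cons, PySem.List.min?_id_cons, Option.map_some, pv_foldl_min_add]

-- a list whose every trailing char was stripped: decomposition via rstrip
theorem pv_rstrip_decomp (cs : List Char) :
    cs = (cs.reverse.dropWhile (· == '0')).reverse
          ++ List.replicate (cs.length - (cs.reverse.dropWhile (· == '0')).reverse.length) '0' := by
  have htw : cs.reverse.takeWhile (· == '0') = List.replicate (cs.reverse.takeWhile (· == '0')).length '0' := by
    apply List.eq_replicate_of_mem
    intro b hb
    have := List.mem_takeWhile_imp hb
    simpa using this
  have hlen : cs.length - (cs.reverse.dropWhile (· == '0')).reverse.length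
      = (cs.reverse.takeWhile (· == '0')).length := by
    have h1 : (cs.reverse.dropWhile (· == '0')).length + (cs.reverse.takeWhile (· == '0')).length = cs.length := by
      have := List.takeWhile_append_dropWhile (p := (· == '0')) (l := cs.reverse)
      have hl := congrArg List.length this
      simp only [List.length_append, List.length_reverse] at hl
      omega
    simp only [List.length_reverse]
    omega
  rw [hlen]
  conv_lhs => rw [← cs.reverse_reverse, ← List.takeWhile_append_dropWhile (p := (· == '0')) (l := cs.reverse)]
  rw [List.reverse_append, htw, List.reverse_replicate]
  simp

theorem pv_digit_facts (c : Char) (hd : c ∈ pyNonzeroDigits) :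
    c ∈ pyStringDigits ∧ (1:Int) ≤ ((c.toNat - 48 : Nat) : Int) := by
  fin_cases hd <;> exact ⟨by decide, by decide⟩

theorem pv_rstrip_fixed (core : List Char) (c : Char) (k : Nat)
    (hc : core.getLast? = some c) (hcz : (c == '0') = false) :
    ((core ++ List.replicate k '0').reverse.dropWhile (· == '0')).reverse = core := by
  rw [List.reverse_append, List.reverse_replicate, List.dropWhile_append]
  have h1 : (List.replicate k '0').dropWhile (· == '0') = [] := by
    simp [List.dropWhile_eq_nil_iff]
  rw [h1]
  simp only [List.isEmpty_nil, if_true]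
  cases hrev : core.reverse with
  | nil =>
    have : core = [] := by simpa using congrArg List.reverse hrev
    rw [this] at hc; cases hc
  | cons a t =>
    have hac : a = c := by
      have h2 := List.head?_reverse (l := core)
      rw [hrev, hc] at h2
      injection h2
    subst hac
    rw [List.dropWhile_cons_of_neg (by simp [hcz])]
    rw [← hrev, List.reverse_reverse]

-- the loop returns its state as soon as min(images) ≠ 0
theorem pv_loopA_exit (p : List Char) (hashes : Nat) (offset : Int) (images : List Int)
    (h : PySem.List.min? images (fun x => x) ≠ some 0) :
    pyLoopA p hashes offset images = (p, hashes, offset, images) := by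
  rw [pyLoopA]; simp [h]

-- the loop of A, evaluated in closed form on a pref = core ++ zeros
theorem pv_loopA_closed (core : List Char) (c : Char) (k hashes : Nat) (offset : Int) (images : List Int)
    (hc : core.getLast? = some c) (hd : c ∈ pyNonzeroDigits)
    (hm : PySem.List.min? images (fun x => x) = some 0) :
    pyLoopA (core ++ List.replicate k '0') hashes offset images
      = (core.dropLast, hashes + k + 1,
         offset - ((c.toNat - 48 : Nat) : Int) * (10 : Int) ^ (hashes + k),
         images.map (fun i => ((c.toNat - 48 : Nat) : Int) * (10 : Int) ^ (hashes + k) + i)) := by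
  induction k generalizing hashes offset with
  | zero =>
    obtain ⟨hdig, hge⟩ := pv_digit_facts c hd
    have hadd1 : (1:Int) ≤ ((c.toNat - 48 : Nat) : Int) * (10 : Int) ^ hashes := by
      have h10 : (1:Int) ≤ (10 : Int) ^ hashes := one_le_pow₀ (by norm_num)
      nlinarith
    rw [List.replicate_zero, List.append_nil, pyLoopA]
    simp only [hm, if_true]
    split
    · next hnone => rw [hc] at hnone; cases hnone
    · next c' hc' =>
      rw [hc] at hc'
      injection hc' with hcc
      subst hcc
      rw [if_pos hdig, pv_loopA_exit]
      · simp
      · rw [pv_min?_map_add, hm]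
        simp only [Option.map_some, add_zero, ne_eq, Option.some.injEq]
        omega
  | succ k ih =>
    have hrep : List.replicate (k+1) '0' = List.replicate k '0' ++ ['0'] := by rw [List.replicate_succ']
    rw [hrep, ← List.append_assoc, pyLoopA]
    simp only [hm, if_true]
    split
    · next hnone => rw [List.getLast?_concat] at hnone; cases hnone
    · next c' hc' =>
      rw [List.getLast?_concat] at hc'
      injection hc' with hcc
      subst hcc
      rw [if_pos (by decide : '0' ∈ pyStringDigits)]
      have hz : (('0'.toNat - 48 : Nat) : Int) = 0 := by decide
      simp only [hz, zero_mul, sub_zero, zero_add, List.map_id_fun', id_eq, List.dropLast_concat]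
      rw [ih (hashes + 1) offset]
      have he : hashes + 1 + k = hashes + (k + 1) := by omega
      rw [he]

-- ===== VERDICT (by name: the statement is the Claim_ definition above) =====
theorem ensure_no_batches_numbered_zero_spec : Claim_equal_ensure_no_batches_numbered_zero := by
  intro template images offset _ hpre
  obtain ⟨hne, hp0⟩ := hpre
  unfold Spec_ensure_no_batches_numbered_zero ensure_no_batches_numbered_zero ensure_no_batches_numbered_zero_alt
  cases hmin : PySem.List.min? images (fun x => x) with
  | none => exact absurd ((PySem.List.min?_eq_none_iff images (fun x => x)).mp hmin) hne
  | some m =>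
    by_cases hgt : m > 0
    · simp [hgt]
    · simp only [if_neg hgt]
      by_cases hm0 : m = 0
      · subst hm0
        have hp := hp0 hmin
        simp only at hp
        set pref := ((PySem.List.pyGet? ((PySem.Str.split? template "#").getD [template]) 0).getD "").toList with hpref
        set core := (pref.reverse.dropWhile (· == '0')).reverse with hcore
        have hnine : core.getLastD ' ' ∈ pyNonzeroDigits := by
          simpa [pyNonzeroDigits] using hp.1
        have hcne : core ≠ [] := by
          intro h
          rw [h] at hnine
          simp [pyNonzeroDigits] at hnine
        obtain ⟨c, hc⟩ := Option.isSome_iff_exists.mp (List.getLast?_isSome.mpr hcne)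
        have hcd : core.getLastD ' ' = c := by
          rw [List.getLastD_eq_getLast?, hc]; rfl
        rw [hcd] at hnine
        set k := pref.length - core.length with hk
        have hdecomp : pref = core ++ List.replicate k '0' := by
          rw [hk, hcore]; exact pv_rstrip_decomp pref
        have hclosed := pv_loopA_closed core c k
          (PySem.Str.count template "#") offset images hc hnine hmin
        rw [hdecomp, hclosed]
        have hcz : (c == '0') = false := by fin_cases hnine <;> decide
        have hrs : pyRstripZeros (core ++ List.replicate k '0') = core := pv_rstrip_fixed core c k hc hcz
        simp [hrs, hc, hnine]
      · -- min(images) = m < 0: A's loop exits immediately, B takes its 'else' branch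
        have hexit := pv_loopA_exit
          (((PySem.List.pyGet? ((PySem.Str.split? template "#").getD [template]) 0).getD "").toList)
          (PySem.Str.count template "#") offset images
          (by rw [hmin]; intro h; exact hm0 (by injection h))
        simp only [hmin, hexit, if_neg hm0]
        simp
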